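-- pv_equiv track=rewrite | github.com/Peterson047/PI4-Dashboard-PGA | scripts/normalization.py | get_multiline_value
-- ===== SOURCE A (Python) =====
-- def get_multiline_value(table, start_label, stop_label):
--     """Extrai um valor de múltiplas linhas entre um rótulo inicial e final."""
--     if not table:
--         return ""
--     capturing = False
--     text_lines = []
--     for row in table:
--         # Se a primeira célula estiver vazia, só continuamos se já estivermos capturando
--         if not row:
--             continue
--         if not row[0] and not capturing:
--             continue
--
--         # Usa startswith para evitar correspondências parciais
--         if row[0].strip().startswith(start_label):
--             capturing = True
--             # Captura conteúdo na mesma linha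
--             if len(row) > 1 and row[1]:
--                 text_lines.append(row[1].strip())
--             continue
--
--         if capturing and row[0].strip().startswith(stop_label):
--             break
--
--         if capturing:
--             # Adiciona o conteúdo da primeira célula não vazia da linha
--             for cell in row:
--                 if cell:
--                     text_lines.append(cell.strip())
--                     break
--
--     return "\n".join(text_lines)
-- ===== SOURCE B (Python) =====
-- def get_multiline_value(table, start_label, stop_label):
--     """Extract multiline text between start and stop labels (two-phase iterator version)."""
--     it = iter(table)
--     lines = []
--     # Phase 1: find the start row
--     for row in it:
--         if not row or not row[0]:
--             continue
--         if row[0].strip().startswith(start_label):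
--             if len(row) > 1 and row[1]:
--                 lines.append(row[1].strip())
--             break
--     else:
--         return ""
--     # Phase 2: collect until the stop row
--     for row in it:
--         if not row:
--             continue
--         head = row[0].strip()
--         if head.startswith(start_label):
--             if len(row) > 1 and row[1]:
--                 lines.append(row[1].strip())
--         elif head.startswith(stop_label):
--             break
--         else:
--             for cell in row:
--                 if cell:
--                     lines.append(cell.strip())
--                     break
--     return "\n".join(lines)
-- ===== Notes on version B (the rewrite author's own statement) =====
-- stated objective: simpler
-- what changed: Replaces the single loop with a 'capturing' boolean flag by two sequential phases over one shared iterator: a search loop that finds the start row, then a collect loop that runs until the stop row, eliminating the flag and the per-row flag tests.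
import Mathlib
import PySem

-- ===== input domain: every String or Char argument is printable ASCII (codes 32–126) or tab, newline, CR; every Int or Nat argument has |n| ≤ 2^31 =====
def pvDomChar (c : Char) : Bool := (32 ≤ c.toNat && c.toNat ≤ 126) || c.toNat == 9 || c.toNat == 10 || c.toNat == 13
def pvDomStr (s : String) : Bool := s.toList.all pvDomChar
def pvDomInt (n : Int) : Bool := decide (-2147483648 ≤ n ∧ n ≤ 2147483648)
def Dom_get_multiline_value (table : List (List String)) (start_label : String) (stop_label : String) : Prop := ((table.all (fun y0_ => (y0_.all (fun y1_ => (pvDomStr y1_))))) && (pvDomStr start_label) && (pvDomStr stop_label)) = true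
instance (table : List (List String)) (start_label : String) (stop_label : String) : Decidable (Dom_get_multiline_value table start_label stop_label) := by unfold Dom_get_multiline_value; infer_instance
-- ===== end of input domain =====

-- B replaces A's single loop with a 'capturing' flag by two sequential phases over the
-- remaining rows (find the start row, then collect until the stop row): simpler decomposition.

-- ===== PORT A =====
-- 'if len(row) > 1 and row[1]: text_lines.append(row[1].strip())' (same-line capture)
def pvACapture (row : List String) : List String :=
  match row with
  | _ :: c1 :: _ => if c1 ≠ "" then [PySem.Str.strip c1] else []
  | _ => []

-- inner 'for cell in row: if cell: text_lines.append(cell.strip()); break'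
def pvAFirst (row : List String) : List String :=
  match row with
  | [] => []
  | c :: rest => if c ≠ "" then [PySem.Str.strip c] else pvAFirst rest

-- A's main loop: state = (capturing, text_lines)
def pvALoop (start_label stop_label : String) (rows : List (List String))
    (capturing : Bool) (acc : List String) : List String :=
  match rows with
  | [] => acc
  | row :: rest =>
    match row with
    | [] => pvALoop start_label stop_label rest capturing acc
    | c0 :: _ =>
      if c0 = "" ∧ capturing = false then
        pvALoop start_label stop_label rest capturing acc
      else if PySem.Str.startswith (PySem.Str.strip c0) start_label then
        pvALoop start_label stop_label rest true (acc ++ pvACapture row)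
      else if capturing = true ∧ PySem.Str.startswith (PySem.Str.strip c0) stop_label then
        acc
      else if capturing = true then
        pvALoop start_label stop_label rest capturing (acc ++ pvAFirst row)
      else
        pvALoop start_label stop_label rest capturing acc

def get_multiline_value (table : List (List String)) (start_label : String) (stop_label : String) : String :=
  if table = [] then ""
  else PySem.Str.join "\n" (pvALoop start_label stop_label table false [])

-- ===== PORT B =====
-- 'if len(row) > 1 and row[1]: lines.append(row[1].strip())'
def pvBCapture (row : List String) : List String :=
  match row with
  | _ :: c1 :: _ => if c1 ≠ "" then [PySem.Str.strip c1] else []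
  | _ => []

-- inner 'for cell in row: if cell: lines.append(cell.strip()); break'
def pvBFirst (row : List String) : List String :=
  match row with
  | [] => []
  | c :: rest => if c ≠ "" then [PySem.Str.strip c] else pvBFirst rest

-- Phase 2: collect until the stop row
def pvBPhase2 (start_label stop_label : String) (rows : List (List String))
    (lines : List String) : List String :=
  match rows with
  | [] => lines
  | row :: rest =>
    match row with
    | [] => pvBPhase2 start_label stop_label rest lines
    | c0 :: _ =>
      let head := PySem.Str.strip c0
      if PySem.Str.startswith head start_label then
        pvBPhase2 start_label stop_label rest (lines ++ pvBCapture row)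
      else if PySem.Str.startswith head stop_label then
        lines
      else
        pvBPhase2 start_label stop_label rest (lines ++ pvBFirst row)

-- Phase 1: find the start row; none = the for-else 'return ""' path
def pvBPhase1 (start_label stop_label : String) (rows : List (List String)) :
    Option (List String) :=
  match rows with
  | [] => none
  | row :: rest =>
    match row with
    | [] => pvBPhase1 start_label stop_label rest
    | c0 :: _ =>
      if c0 = "" then pvBPhase1 start_label stop_label rest
      else if PySem.Str.startswith (PySem.Str.strip c0) start_label then
        some (pvBPhase2 start_label stop_label rest (pvBCapture row))
      else pvBPhase1 start_label stop_label rest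

def get_multiline_value_alt (table : List (List String)) (start_label : String) (stop_label : String) : String :=
  match pvBPhase1 start_label stop_label table with
  | none => ""
  | some lines => PySem.Str.join "\n" lines

-- ===== PRECONDITION & SPEC =====
def Spec_get_multiline_value (table : List (List String)) (start_label : String) (stop_label : String) (out : String) : Prop := out = get_multiline_value_alt table start_label stop_label
instance (table : List (List String)) (start_label : String) (stop_label : String) (out : String) : Decidable (Spec_get_multiline_value table start_label stop_label out) := by unfold Spec_get_multiline_value; infer_instance

-- ===== CLAIM (what is proved, stated in full; the proofs are below) =====
def Claim_equal_get_multiline_value : Prop := ∀ (table : List (List String)) (start_label : String) (stop_label : String), Dom_get_multiline_value table start_label stop_label → Spec_get_multiline_value table start_label stop_label (get_multiline_value table start_label stop_label)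

-- ===== LEMMAS AND PROOFS =====

theorem pvCapture_eq (row : List String) : pvACapture row = pvBCapture row := rfl

theorem pvFirst_eq (row : List String) : pvAFirst row = pvBFirst row := by
  induction row with
  | nil => rfl
  | cons c rest ih => simp [pvAFirst, pvBFirst, ih]

theorem pvBPhase2_append (start_label stop_label : String) (rows : List (List String)) :
    ∀ (a b : List String),
      pvBPhase2 start_label stop_label rows (a ++ b) =
        a ++ pvBPhase2 start_label stop_label rows b := by
  induction rows with
  | nil => intro a b; rfl
  | cons row rest ih =>
    intro a b
    match row with
    | [] => simpa [pvBPhase2] using ih a b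
    | c0 :: cs =>
      simp only [pvBPhase2]
      split_ifs with h1 h2
      · rw [List.append_assoc]; exact ih a (b ++ pvBCapture (c0 :: cs))
      · rfl
      · rw [List.append_assoc]; exact ih a (b ++ pvBFirst (c0 :: cs))

theorem pvLoop_true_eq (start_label stop_label : String) (rows : List (List String)) :
    ∀ (acc : List String),
      pvALoop start_label stop_label rows true acc =
        pvBPhase2 start_label stop_label rows acc := by
  induction rows with
  | nil => intro acc; rfl
  | cons row rest ih =>
    intro acc
    match row with
    | [] => simpa [pvALoop, pvBPhase2] using ih acc
    | c0 :: cs =>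
      simp only [pvALoop, pvBPhase2, pvCapture_eq, pvFirst_eq]
      split_ifs with h1 h2 h3 <;> simp_all

theorem pvLoop_false_eq (start_label stop_label : String) (rows : List (List String)) :
    ∀ (acc : List String),
      pvALoop start_label stop_label rows false acc =
        acc ++ (match pvBPhase1 start_label stop_label rows with
                | none => []
                | some ls => ls) := by
  induction rows with
  | nil => intro acc; simp [pvALoop, pvBPhase1]
  | cons row rest ih =>
    intro acc
    match row with
    | [] => simpa [pvALoop, pvBPhase1] using ih acc
    | c0 :: cs =>
      simp only [pvALoop, pvBPhase1, pvCapture_eq]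
      split_ifs with h1 h2 <;>
        simp_all [pvLoop_true_eq, pvBPhase2_append]

-- ===== VERDICT (by name: the statement is the Claim_ definition above) =====
theorem get_multiline_value_spec : Claim_equal_get_multiline_value := by
  intro table start_label stop_label _
  unfold Spec_get_multiline_value get_multiline_value get_multiline_value_alt
  by_cases htab : table = []
  · subst htab; simp [pvBPhase1]
  · simp only [if_neg htab, pvLoop_false_eq, List.nil_append]
    cases h : pvBPhase1 start_label stop_label table <;> simp [PySem.Str.join]
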